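-- pv_equiv track=rewrite | github.com/raeufroushangar/MICA-Weighted | src/seq_partitioner.py | partition_seq_length
-- ===== SOURCE A (Python) =====
-- def partition_seq_length(seq_length):
--     """
--     Partition a given sequence length into sub-subregions for further analysis.
--
--     Args:
--     - seq_length (int): Length of sequence to partition.
--
--     Returns:
--     - subsubregions_0 (list): List of sub-subregions starting from index 0.
--     - subsubregions_15 (list): List of sub-subregions starting from index 15.
--
--     Raises:
--     - ValueError: If seq_length is not an integer or is less than 45.
--     """
--
--     if not isinstance(seq_length, int):
--         raise ValueError(f"Error: Sequence length must be an integer. Received: {seq_length}")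
--
--     if seq_length < 45:
--         raise ValueError(f"Error: Sequence length must be at least 45. You entered {seq_length}")
--
--     # Initialize lists to store subsubregions
--     subsubregions_0 = []
--     subsubregions_15 = []
--
--     # Process for subsubregions starting at index 0
--     remaining_seq_length = seq_length
--     start_index = 0
--     subsubregion_number = 1
--     while remaining_seq_length > 0:
--         if remaining_seq_length <= 45:
--             subsubregions_0.append([subsubregion_number, remaining_seq_length, start_index, start_index + remaining_seq_length - 1])
--             break
--         else:
--             subsubregions_0.append([subsubregion_number, 30, start_index, start_index + 29])
--             remaining_seq_length -= 30
--             start_index += 30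
--             subsubregion_number += 1
--
--     # Process for subsubregions starting at index 15
--     if seq_length <= 45:
--         subsubregions_15.append([1, seq_length, 0, seq_length - 1])
--     else:
--         remaining_seq_length = seq_length - 30
--         start_index = 15
--         subsubregion_number = 1
--         while remaining_seq_length > 0:
--             if remaining_seq_length <= 45:
--                 subsubregions_15.append([subsubregion_number, remaining_seq_length, start_index, start_index + remaining_seq_length - 1])
--                 break
--             else:
--                 subsubregions_15.append([subsubregion_number, 30, start_index, start_index + 29])
--                 remaining_seq_length -= 30
--                 start_index += 30
--                 subsubregion_number += 1
--     # Return the partitioned subsubregions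
--
--     return subsubregions_0, subsubregions_15
-- ===== SOURCE B (Python) =====
-- def partition_seq_length(seq_length):
--     if not isinstance(seq_length, int):
--         raise ValueError(f"Error: Sequence length must be an integer. Received: {seq_length}")
--     if seq_length < 45:
--         raise ValueError(f"Error: Sequence length must be at least 45. You entered {seq_length}")
--
--     def chunks(remaining, offset):
--         # number of full 30-length chunks before the final remainder chunk
--         k = (remaining - 16) // 30
--         out = [[i + 1, 30, offset + 30 * i, offset + 30 * i + 29] for i in range(k)]
--         out.append([k + 1, remaining - 30 * k, offset + 30 * k, offset + remaining - 1])
--         return out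
--
--     subsubregions_0 = chunks(seq_length, 0)
--     if seq_length <= 45:
--         subsubregions_15 = [[1, seq_length, 0, seq_length - 1]]
--     else:
--         subsubregions_15 = chunks(seq_length - 30, 15)
--     return subsubregions_0, subsubregions_15
-- ===== Notes on version B (the rewrite author's own statement) =====
-- stated objective: alternative
-- what changed: Replaces A's two decrement-and-break while loops by a closed-form chunk count k = (remaining-16)//30 and a range(k) comprehension plus one remainder chunk, factored into a helper called for both offsets.
import Mathlib
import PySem

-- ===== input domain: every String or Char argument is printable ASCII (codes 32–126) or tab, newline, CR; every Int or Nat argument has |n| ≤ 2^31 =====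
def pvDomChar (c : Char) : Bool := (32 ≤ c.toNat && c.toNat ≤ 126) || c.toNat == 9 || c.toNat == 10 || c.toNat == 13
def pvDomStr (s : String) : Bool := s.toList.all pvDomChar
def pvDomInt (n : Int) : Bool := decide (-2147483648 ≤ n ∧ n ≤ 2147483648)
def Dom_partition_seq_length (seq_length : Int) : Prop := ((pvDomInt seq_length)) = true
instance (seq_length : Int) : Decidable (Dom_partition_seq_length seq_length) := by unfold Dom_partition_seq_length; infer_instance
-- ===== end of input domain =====

-- B replaces A's decrement-and-break while loops by a closed-form chunk count and a
-- range comprehension (objective: alternative decomposition; same asymptotic cost).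


-- ===== PORT A =====
-- A's while loop: append 30-chunks while remaining > 45, final chunk when remaining ≤ 45.
def pvLoopA (remaining start_index num : Int) : List (List Int) :=
  if h : remaining > 0 then
    if remaining ≤ 45 then
      [[num, remaining, start_index, start_index + remaining - 1]]
    else
      [num, 30, start_index, start_index + 29] :: pvLoopA (remaining - 30) (start_index + 30) (num + 1)
  else []
termination_by remaining.toNat
decreasing_by omega

def partition_seq_length (seq_length : Int) : List (List Int) × List (List Int) :=
  let subsubregions_0 := pvLoopA seq_length 0 1
  let subsubregions_15 :=
    if seq_length ≤ 45 then [[1, seq_length, 0, seq_length - 1]]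
    else pvLoopA (seq_length - 30) 15 1
  (subsubregions_0, subsubregions_15)

-- ===== PORT B =====
-- B's helper: k full 30-chunks by closed form, comprehension over range(k), then remainder.
def pvChunksB (remaining offset : Int) : List (List Int) :=
  let k := PySem.Int.floordiv (remaining - 16) 30
  ((PySem.List.pyRange 0 k 1).map
      (fun i => [i + 1, 30, offset + 30 * i, offset + 30 * i + 29])) ++
    [[k + 1, remaining - 30 * k, offset + 30 * k, offset + remaining - 1]]

def partition_seq_length_alt (seq_length : Int) : List (List Int) × List (List Int) :=
  let subsubregions_0 := pvChunksB seq_length 0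
  let subsubregions_15 :=
    if seq_length ≤ 45 then [[1, seq_length, 0, seq_length - 1]]
    else pvChunksB (seq_length - 30) 15
  (subsubregions_0, subsubregions_15)

-- ===== PRECONDITION & SPEC =====
-- A raises ValueError for seq_length < 45; exactly those inputs are excluded.
def Pre_partition_seq_length (seq_length : Int) : Prop := 45 ≤ seq_length
instance (seq_length : Int) : Decidable (Pre_partition_seq_length seq_length) := by
  unfold Pre_partition_seq_length; infer_instance
def pvWitness_partition_seq_length : Int := 100

def Spec_partition_seq_length (seq_length : Int) (out : List (List Int) × List (List Int)) : Prop := out = partition_seq_length_alt seq_length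
instance (seq_length : Int) (out : List (List Int) × List (List Int)) : Decidable (Spec_partition_seq_length seq_length out) := by unfold Spec_partition_seq_length; infer_instance

-- ===== CLAIM (what is proved, stated in full; the proofs are below) =====
def Claim_equal_partition_seq_length : Prop := ∀ (seq_length : Int), Dom_partition_seq_length seq_length → Pre_partition_seq_length seq_length → Spec_partition_seq_length seq_length (partition_seq_length seq_length)

-- ===== LEMMAS AND PROOFS =====

-- the closed-form chunk count agrees with the loop: for 15 < r,
-- the loop with counter n produces k = (r-16)//30 full chunks then the remainder.
theorem pvFloordiv30 (a : Int) : PySem.Int.floordiv a 30 = a / 30 := by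
  simp [PySem.Int.floordiv, Int.fdiv_eq_ediv_of_nonneg a (by norm_num : (0:Int) ≤ 30)]

theorem pvRangeSucc (k : Int) (h : 0 ≤ k) :
    PySem.List.pyRange 0 (k + 1) 1 = 0 :: (PySem.List.pyRange 0 k 1).map (· + 1) := by
  rw [PySem.List.pyRange_one, PySem.List.pyRange_one]
  have ht : (k + 1 - 0).toNat = (k - 0).toNat + 1 := by omega
  rw [ht, List.range_succ_eq_map]
  simp only [List.map_cons, List.map_map, List.cons.injEq]
  refine ⟨by norm_num, List.map_congr_left ?_⟩
  intro a _
  simp only [Function.comp_apply]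
  push_cast
  ring

theorem pvLoopA_eq_chunks (r : Int) (hr : 15 < r) (s n : Int) :
    pvLoopA r s n =
      ((PySem.List.pyRange 0 (PySem.Int.floordiv (r - 16) 30) 1).map
          (fun i => [n + i, 30, s + 30 * i, s + 30 * i + 29])) ++
        [[n + PySem.Int.floordiv (r - 16) 30,
          r - 30 * PySem.Int.floordiv (r - 16) 30,
          s + 30 * PySem.Int.floordiv (r - 16) 30, s + r - 1]] := by
  rw [pvFloordiv30]
  by_cases h45 : r ≤ 45
  · have hk : (r - 16) / 30 = 0 := by omega
    rw [pvLoopA]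
    simp [show r > 0 by omega, h45, hk]
  · have hk : (r - 16) / 30 = (r - 30 - 16) / 30 + 1 := by omega
    have h0 : 0 ≤ (r - 30 - 16) / 30 := by omega
    rw [pvLoopA]
    rw [dif_pos (by omega : r > 0), if_neg h45]
    rw [pvLoopA_eq_chunks (r - 30) (by omega) (s + 30) (n + 1), pvFloordiv30]
    rw [hk]
    conv_rhs => rw [pvRangeSucc _ h0]
    simp only [List.map_cons, List.map_map, List.cons_append, List.cons.injEq]
    refine ⟨⟨by ring, trivial, by ring, by ring, trivial⟩, ?_⟩
    congr 1
    · apply List.map_congr_left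
      intro i _
      simp only [Function.comp_apply, List.cons.injEq, and_true, true_and]
      omega
    · simp only [List.cons.injEq, and_true]
      omega
termination_by r.toNat
decreasing_by omega

theorem partition_seq_length_spec : Claim_equal_partition_seq_length := by
  intro L _ hpre
  unfold Spec_partition_seq_length partition_seq_length partition_seq_length_alt pvChunksB
  have h0 := pvLoopA_eq_chunks L (by unfold Pre_partition_seq_length at hpre; omega) 0 1
  by_cases h45 : L ≤ 45
  · simp [h45, h0]
    exact ⟨fun a _ _ => by ring, by ring⟩
  · have h15 := pvLoopA_eq_chunks (L - 30) (by unfold Pre_partition_seq_length at hpre; omega) 15 1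
    simp [h45, h0, h15]
    exact ⟨⟨fun a _ _ => by ring, by ring⟩, fun a _ _ => by ring, by ring⟩
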